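-- pv_equiv track=rewrite | github.com/VisualGMQ/PythonCode | PlusEngine.py | LineSeg1D
-- ===== SOURCE A (Python) =====
-- def LineSeg1D(pointlist):
--     max=pointlist[0]
--     min=pointlist[0]
--     for i in pointlist:
--         if max<i:
--            max=i
--     for j in pointlist:
--         if min>j:
--            min=j
--     if abs(max-min)>(abs(pointlist[0]-pointlist[1])+abs(pointlist[2]-pointlist[3])):
--         return False
--     else:
--         return True
-- ===== SOURCE B (Python) =====
-- def LineSeg1D(pointlist):
--     s = sorted(pointlist)
--     spread = s[-1] - s[0]
--     return spread <= abs(pointlist[0] - pointlist[1]) + abs(pointlist[2] - pointlist[3])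
-- ===== Notes on version B (the rewrite author's own statement) =====
-- stated objective: alternative
-- what changed: B replaces A's two explicit max/min scanning loops by sorting the list once and reading the extremes off the ends, and returns the comparison spread <= bound directly instead of A's if/else over the negated test.
import Mathlib
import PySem

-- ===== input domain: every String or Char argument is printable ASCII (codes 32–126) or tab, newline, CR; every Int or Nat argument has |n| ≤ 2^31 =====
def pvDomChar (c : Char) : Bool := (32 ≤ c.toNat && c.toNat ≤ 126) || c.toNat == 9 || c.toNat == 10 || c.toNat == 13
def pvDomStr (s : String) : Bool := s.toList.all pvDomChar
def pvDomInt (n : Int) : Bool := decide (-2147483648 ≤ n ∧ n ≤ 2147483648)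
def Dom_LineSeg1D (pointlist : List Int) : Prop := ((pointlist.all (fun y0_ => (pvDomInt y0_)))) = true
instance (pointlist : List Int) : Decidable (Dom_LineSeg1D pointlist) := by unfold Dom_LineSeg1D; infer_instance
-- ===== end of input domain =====

-- B sorts the list once and reads the extremes off the ends instead of A's two max/min scanning loops.

-- ===== PORT A =====
def LineSeg1D (pointlist : List Int) : Bool :=
  match PySem.List.pyGet? pointlist 0 with
  | none => false  -- unreachable under Pre_ (IndexError on pointlist[0])
  | some p0 =>
    let mx := pointlist.foldl (fun m i => if m < i then i else m) p0
    let mn := pointlist.foldl (fun m j => if m > j then j else m) p0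
    match PySem.List.pyGet? pointlist 1, PySem.List.pyGet? pointlist 2, PySem.List.pyGet? pointlist 3 with
    | some p1, some p2, some p3 =>
        if |mx - mn| > |p0 - p1| + |p2 - p3| then false else true
    | _, _, _ => false  -- unreachable under Pre_ (IndexError)

-- ===== PORT B =====
def LineSeg1D_alt (pointlist : List Int) : Bool :=
  let s := PySem.List.sorted pointlist (fun x => x) false
  -- each indexing is unwrapped one at a time; `none` = IndexError, unreachable under Pre_
  match PySem.List.pyGet? s (-1) with
  | none => false
  | some hi =>
    match PySem.List.pyGet? s 0 with
    | none => false
    | some lo =>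
      let spread := hi - lo
      match PySem.List.pyGet? pointlist 0 with
      | none => false
      | some p0 =>
        match PySem.List.pyGet? pointlist 1 with
        | none => false
        | some p1 =>
          match PySem.List.pyGet? pointlist 2 with
          | none => false
          | some p2 =>
            match PySem.List.pyGet? pointlist 3 with
            | none => false
            | some p3 => decide (spread ≤ |p0 - p1| + |p2 - p3|)

-- ===== PRECONDITION & SPEC =====
-- Pre_ excludes lists of fewer than 4 elements, on which A raises IndexError (pointlist[0..3]).
def Pre_LineSeg1D (pointlist : List Int) : Prop := 4 ≤ pointlist.length
instance (pointlist : List Int) : Decidable (Pre_LineSeg1D pointlist) := by unfold Pre_LineSeg1D; infer_instance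
def pvWitness_LineSeg1D : List Int := [3, 1, 4, 1, 5]
def Spec_LineSeg1D (pointlist : List Int) (out : Bool) : Prop := out = LineSeg1D_alt pointlist
instance (pointlist : List Int) (out : Bool) : Decidable (Spec_LineSeg1D pointlist out) := by unfold Spec_LineSeg1D; infer_instance

-- ===== CLAIM (what is proved, stated in full; the proofs are below) =====
def Claim_equal_LineSeg1D : Prop := ∀ (pointlist : List Int), Dom_LineSeg1D pointlist → Pre_LineSeg1D pointlist → Spec_LineSeg1D pointlist (LineSeg1D pointlist)

-- ===== LEMMAS AND PROOFS =====

lemma foldl_if_lt_eq_max (t : List Int) (a : Int) :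
    t.foldl (fun m i => if m < i then i else m) a = t.foldl max a := by
  induction t generalizing a with
  | nil => rfl
  | cons x t ih =>
    simp only [List.foldl_cons, ih]
    congr 1
    rcases lt_or_ge a x with h | h
    · simp [h, max_eq_right h.le]
    · simp [not_lt.mpr h, max_eq_left h]

lemma foldl_if_gt_eq_min (t : List Int) (a : Int) :
    t.foldl (fun m j => if m > j then j else m) a = t.foldl min a := by
  induction t generalizing a with
  | nil => rfl
  | cons x t ih =>
    simp only [List.foldl_cons, ih]
    congr 1
    rcases lt_or_ge x a with h | h
    · simp [h, min_eq_right h.le]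
    · simp [not_lt.mpr h, min_eq_left h]

lemma pairwise_le_getLast? : ∀ {l : List Int}, l.Pairwise (fun a b => a ≤ b) →
    ∀ y ∈ l, ∃ m, l.getLast? = some m ∧ y ≤ m := by
  intro l
  induction l with
  | nil => intro _ y hy; cases hy
  | cons x t ih =>
    intro hp y hy
    cases t with
    | nil => simp at hy; exact ⟨x, by simp, le_of_eq hy⟩
    | cons z t' =>
      have hp' := hp.of_cons
      rw [List.getLast?_cons_cons]
      rcases List.mem_cons.mp hy with rfl | hyt
      · obtain ⟨m, hm, hzm⟩ := ih hp' z List.mem_cons_self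
        exact ⟨m, hm, le_trans ((List.pairwise_cons.mp hp).1 z List.mem_cons_self) hzm⟩
      · exact ih hp' y hyt

-- sorted list of (x :: t): first element is the running min, last is the running max
lemma sorted_head_last (x : Int) (t : List Int) :
    (PySem.List.sorted (x :: t) (fun y => y) false)[0]? = some (t.foldl min x) ∧
    (PySem.List.sorted (x :: t) (fun y => y) false).getLast? = some (t.foldl max x) := by
  set s := PySem.List.sorted (x :: t) (fun y => y) false with hs
  have hperm : s.Perm (x :: t) := PySem.List.sorted_perm _ _ _
  have hpw : s.Pairwise (fun a b => a ≤ b) := by simpa using PySem.List.sorted_pairwise (x :: t) (fun y => y)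
  have hne : s ≠ [] := by
    intro h; have := hperm.length_eq; simp [h] at this
  obtain ⟨m, tl, hcons⟩ := List.exists_cons_of_ne_nil hne
  have hmin_le := PySem.List.foldl_min_le t x
  have hmax_le := PySem.List.le_foldl_max t x
  have hmin_mem : t.foldl min x ∈ x :: t := by
    rcases PySem.List.foldl_min_mem t x with h | h
    · rw [h]; exact List.mem_cons_self
    · exact List.mem_cons_of_mem _ h
  have hmax_mem : t.foldl max x ∈ x :: t := by
    rcases PySem.List.foldl_max_mem t x with h | h
    · rw [h]; exact List.mem_cons_self
    · exact List.mem_cons_of_mem _ h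
  have hmem_iff : ∀ y, y ∈ s ↔ y ∈ x :: t := fun y => hperm.mem_iff
  constructor
  · -- head
    have hhead := PySem.List.key_head_sorted_le (xs := x :: t) (key := fun y => y) (hs ▸ hcons)
    have h1 : m ≤ t.foldl min x := hhead _ hmin_mem
    have hm_mem : m ∈ x :: t := (hmem_iff m).mp (hcons ▸ List.mem_cons_self)
    have h2 : t.foldl min x ≤ m := by
      rcases List.mem_cons.mp hm_mem with rfl | h
      · exact hmin_le.1
      · exact hmin_le.2 _ h
    rw [hcons]; simp [le_antisymm h2 h1]
  · -- last
    obtain ⟨M, hM, hleM⟩ := pairwise_le_getLast? hpw _ ((hmem_iff _).mpr hmax_mem)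
    have hM_mem : M ∈ x :: t := (hmem_iff M).mp (List.mem_of_getLast? hM)
    have h2 : M ≤ t.foldl max x := by
      rcases List.mem_cons.mp hM_mem with rfl | h
      · exact hmax_le.1
      · exact hmax_le.2 _ h
    rw [hM, le_antisymm h2 hleM]

-- ===== VERDICT (by name: the statement is the Claim_ definition above) =====
theorem LineSeg1D_spec : Claim_equal_LineSeg1D := by
  intro pointlist _ hpre
  unfold Pre_LineSeg1D at hpre
  rcases pointlist with _ | ⟨p0, _ | ⟨v1, _ | ⟨v2, _ | ⟨v3, r⟩⟩⟩⟩ <;>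
    try (exfalso; revert hpre; simp; done)
  unfold Spec_LineSeg1D LineSeg1D LineSeg1D_alt
  obtain ⟨h0, hL⟩ := sorted_head_last p0 (v1 :: v2 :: v3 :: r)
  have hg1 : PySem.List.pyGet? (p0 :: v1 :: v2 :: v3 :: r) 1 = some v1 := by
    rw [show (1 : Int) = ((1 : Nat) : Int) from rfl, PySem.List.pyGet?_natCast]; rfl
  have hg2 : PySem.List.pyGet? (p0 :: v1 :: v2 :: v3 :: r) 2 = some v2 := by
    rw [show (2 : Int) = ((2 : Nat) : Int) from rfl, PySem.List.pyGet?_natCast]; rfl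
  have hg3 : PySem.List.pyGet? (p0 :: v1 :: v2 :: v3 :: r) 3 = some v3 := by
    rw [show (3 : Int) = ((3 : Nat) : Int) from rfl, PySem.List.pyGet?_natCast]; rfl
  simp only [PySem.List.pyGet?_neg_one, PySem.List.pyGet?_zero, hg1, hg2, hg3, h0, hL,
    List.getElem?_cons_zero]
  rw [show List.foldl (fun m i => if m < i then i else m) p0 (p0 :: v1 :: v2 :: v3 :: r)
        = List.foldl (fun m i => if m < i then i else m) p0 (v1 :: v2 :: v3 :: r) by
      rw [List.foldl_cons]; simp,
    show List.foldl (fun m j => if m > j then j else m) p0 (p0 :: v1 :: v2 :: v3 :: r)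
        = List.foldl (fun m j => if m > j then j else m) p0 (v1 :: v2 :: v3 :: r) by
      rw [List.foldl_cons]; simp,
    foldl_if_lt_eq_max, foldl_if_gt_eq_min]
  set t := v1 :: v2 :: v3 :: r with ht
  have hle : t.foldl min p0 ≤ t.foldl max p0 :=
    le_trans (PySem.List.foldl_min_le t p0).1 (PySem.List.le_foldl_max t p0).1
  rw [abs_of_nonneg (by omega)]
  by_cases h : t.foldl max p0 - t.foldl min p0 > |p0 - v1| + |v2 - v3|
  · simp [h, not_le.mpr h]
  · simp [h, not_lt.mp h]
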